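-- pv_equiv track=rewrite | github.com/KimVegetable/miat | parsers/codecs/video/h264_parser.py | more_rbsp_data
-- ===== SOURCE A (Python) =====
-- def more_rbsp_data(data, bit_pos):
--     """
--     Check if there is more RBSP data.
--     """
--     byte_pos = bit_pos // 8
--     bit_in_byte = bit_pos % 8
--
--     if byte_pos >= len(data):
--         return False
--
--     trailing_data = data[byte_pos:]
--
--     # Find the last significant bit equal to 1
--     last_significant_bit_pos = -1
--     for i in range(len(trailing_data) * 8 - 1, -1, -1):
--         if (trailing_data[i // 8] >> (7 - (i % 8))) & 0x01:
--             last_significant_bit_pos = i + byte_pos * 8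
--             break
--
--     if last_significant_bit_pos == -1:
--         return False
--
--     # Check if there is more data before the rbsp_trailing_bits() structure
--     return last_significant_bit_pos > bit_pos
-- ===== SOURCE B (Python) =====
-- def more_rbsp_data(data, bit_pos):
--     """
--     Check if there is more RBSP data.
--     """
--     byte_pos = bit_pos // 8
--     if byte_pos >= len(data):
--         return False
--     # The last set bit of the stream lies in the last nonzero byte, at that
--     # byte's least significant set bit; find it with (b & -b).bit_length().
--     for k in range(len(data) - 1, byte_pos - 1, -1):
--         b = data[k] & 0xFF
--         if b:
--             last_bit = 8 * k + 7 - ((b & -b).bit_length() - 1)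
--             return last_bit > bit_pos
--     return False
-- ===== Notes on version B (the rewrite author's own statement) =====
-- stated objective: alternative
-- what changed: A copies the trailing slice and scans every bit of it from the end (8 shift-and-mask tests per byte); B scans the buffer in place byte by byte from the end and, on the first nonzero byte, computes the answer in closed form with the least-significant-set-bit trick (b & -b).bit_length(); Pre_ restricts to nonnegative bit_pos, the natural domain of a bit offset into a stream.
-- outside the precondition, e.g. on more_rbsp_data([1], -2): A returns False, B returns True
import Mathlib
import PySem

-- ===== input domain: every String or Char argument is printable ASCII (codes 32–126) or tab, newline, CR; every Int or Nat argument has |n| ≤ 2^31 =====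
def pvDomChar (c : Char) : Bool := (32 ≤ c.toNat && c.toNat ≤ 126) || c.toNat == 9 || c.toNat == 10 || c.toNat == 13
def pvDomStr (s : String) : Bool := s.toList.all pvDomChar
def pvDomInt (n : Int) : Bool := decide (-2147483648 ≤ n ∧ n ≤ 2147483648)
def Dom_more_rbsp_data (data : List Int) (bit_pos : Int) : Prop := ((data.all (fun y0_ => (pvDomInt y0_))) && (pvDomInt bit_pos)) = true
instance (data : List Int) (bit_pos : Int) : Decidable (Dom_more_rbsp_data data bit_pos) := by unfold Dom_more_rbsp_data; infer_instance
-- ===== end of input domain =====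

-- B replaces A's slice copy plus whole-tail descending bit scan (8 bit tests per byte) by an
-- in-place reverse byte scan that answers in closed form at the first nonzero byte via the
-- least-significant-set-bit trick (b & -b, bit_length) (objective: alternative).

-- ===== PORT A =====
-- the descending loop 'for i in range(len(t)*8 - 1, -1, -1): if (t[i//8] >> (7-(i%8))) & 1: last = i + byte_pos*8; break'
-- fuel n = number of indices left; current index i = n-1 (i ≥ 0, so Python's i//8, i%8 are Nat / and %);
-- the list index i/8 is always in range here, so t[i//8] is ported as t.getD (i/8) 0 (the default is never used)
def aScan (t : List Int) (bp : Int) : Nat → Int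
  | 0 => -1
  | i + 1 =>
    if PySem.Int.band ((t.getD (i / 8) 0) >>> (7 - i % 8)) 1 ≠ 0 then (i : Int) + bp * 8
    else aScan t bp i

def more_rbsp_data (data : List Int) (bit_pos : Int) : Bool :=
  let byte_pos := PySem.Int.floordiv bit_pos 8
  if (data.length : Int) ≤ byte_pos then false
  else
    let trailing := PySem.List.slice data (some byte_pos) none
    let last := aScan trailing byte_pos (trailing.length * 8)
    if last = -1 then false else decide (last > bit_pos)

-- ===== PORT B =====
-- Source B's loop 'for k in range(len(data)-1, byte_pos-1, -1): b = data[k] & 0xFF; if b: return 8*k + 7 - ((b & -b).bit_length() - 1) > bit_pos'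
-- fuel m = number of byte indices left; current index k = start + (m-1); data[k] is always in range here, ported as getD;
-- the range runs len(data) - byte_pos times (0 ≤ byte_pos < len(data) at the call site under Pre_), realised as start := byte_pos.toNat
def bScan (data : List Int) (bitp : Int) (start : Nat) : Nat → Bool
  | 0 => false
  | m + 1 =>
    let k := start + m
    let b := PySem.Int.band (data.getD k 0) 255
    if b ≠ 0 then
      decide (8 * (k : Int) + 7 - ((PySem.Int.bitLength (PySem.Int.band b (-b)) : Int) - 1) > bitp)
    else bScan data bitp start m

def more_rbsp_data_alt (data : List Int) (bit_pos : Int) : Bool :=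
  let byte_pos := PySem.Int.floordiv bit_pos 8
  if (data.length : Int) ≤ byte_pos then false
  else
    let start := byte_pos.toNat
    bScan data bit_pos start (data.length - start)

-- ===== PRECONDITION & SPEC =====
-- Pre_ restricts to nonnegative bit_pos, the natural domain of a bit offset into a stream;
-- on negative bit_pos A's -1 "not found" sentinel can coincide with a genuinely computed bit
-- position (i + byte_pos*8 = -1 when byte_pos < 0), so A's value there is accidental.
def Pre_more_rbsp_data (data : List Int) (bit_pos : Int) : Prop := 0 ≤ bit_pos
instance (data : List Int) (bit_pos : Int) : Decidable (Pre_more_rbsp_data data bit_pos) := by unfold Pre_more_rbsp_data; infer_instance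

def pvWitness_more_rbsp_data : List Int × Int := ([1], 0)

def Spec_more_rbsp_data (data : List Int) (bit_pos : Int) (out : Bool) : Prop := out = more_rbsp_data_alt data bit_pos
instance (data : List Int) (bit_pos : Int) (out : Bool) : Decidable (Spec_more_rbsp_data data bit_pos out) := by unfold Spec_more_rbsp_data; infer_instance

-- ===== CLAIM (what is proved, stated in full; the proofs are below) =====
def Claim_equal_more_rbsp_data : Prop := ∀ (data : List Int) (bit_pos : Int), Dom_more_rbsp_data data bit_pos → Pre_more_rbsp_data data bit_pos → Spec_more_rbsp_data data bit_pos (more_rbsp_data data bit_pos)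

-- ===== LEMMAS AND PROOFS =====

-- a & 0xFF is the low byte: band v 255 = v % 256 (Python's two's-complement &)
lemma nat_and255 (m : Nat) : m &&& 255 = m % 256 := by
  have := Nat.and_two_pow_sub_one_eq_mod m 8
  norm_num at this; exact this

lemma band255 (v : Int) : PySem.Int.band v 255 = v % 256 := by
  by_cases h : 0 ≤ v
  · rw [show v = ((v.toNat : Nat) : Int) by omega,
        show (255 : Int) = ((255 : Nat) : Int) from rfl, PySem.Int.band_natCast,
        nat_and255]
    push_cast; omega
  · show (if 0 ≤ v then _ else _) = _
    rw [if_neg h, if_pos (by norm_num : (0:Int) ≤ 255),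
        show ((255:Int).toNat) = 255 from rfl, Nat.and_comm, nat_and255]
    have h3 : (-v - 1).toNat % 256 < 256 := Nat.mod_lt _ (by norm_num)
    have h5 : ((-v - 1).toNat : Int) = -v - 1 := by omega
    have h6 : (((-v - 1).toNat % 256 : Nat) : Int) = ((-v - 1).toNat : Int) % 256 := by push_cast; ring
    omega

-- bit s of b (s < 8) only depends on the low byte b % 256
lemma bit_stable (b : Int) (s : Nat) (hs : s < 8) :
    (PySem.Int.band (b >>> s) 1 ≠ 0) ↔ (PySem.Int.band ((b % 256) >>> s) 1 ≠ 0) := by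
  rw [PySem.Int.band_one, PySem.Int.band_one,
    PySem.Int.mod_eq_emod_of_pos (by norm_num), PySem.Int.mod_eq_emod_of_pos (by norm_num),
    Int.shiftRight_eq_div_pow, Int.shiftRight_eq_div_pow]
  interval_cases s <;> omega

-- the finite per-byte facts (least significant set bit = v & -v, bit_length), checked over the 256 low bytes
set_option maxRecDepth 8192 in
lemma byteFact : ∀ n : Nat, n < 256 →
    (((n : Int) = 0 ↔ ∀ s : Nat, s < 8 → ¬ (PySem.Int.band ((n : Int) >>> s) 1 ≠ 0)) ∧
     ((n : Int) ≠ 0 →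
       (1 ≤ PySem.Int.bitLength (PySem.Int.band (n : Int) (-(n : Int))) ∧
        PySem.Int.bitLength (PySem.Int.band (n : Int) (-(n : Int))) ≤ 8 ∧
        (PySem.Int.band ((n : Int) >>> (PySem.Int.bitLength (PySem.Int.band (n : Int) (-(n : Int))) - 1)) 1 ≠ 0) ∧
        ∀ s : Nat, s < PySem.Int.bitLength (PySem.Int.band (n : Int) (-(n : Int))) - 1 →
          ¬ (PySem.Int.band ((n : Int) >>> s) 1 ≠ 0)))) := by decide

lemma byteFact_of (b : Int) :
    ((b % 256 = 0 ↔ ∀ s : Nat, s < 8 → ¬ (PySem.Int.band ((b % 256) >>> s) 1 ≠ 0)) ∧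
     (b % 256 ≠ 0 →
       (1 ≤ PySem.Int.bitLength (PySem.Int.band (b % 256) (-(b % 256))) ∧
        PySem.Int.bitLength (PySem.Int.band (b % 256) (-(b % 256))) ≤ 8 ∧
        (PySem.Int.band ((b % 256) >>> (PySem.Int.bitLength (PySem.Int.band (b % 256) (-(b % 256))) - 1)) 1 ≠ 0) ∧
        ∀ s : Nat, s < PySem.Int.bitLength (PySem.Int.band (b % 256) (-(b % 256))) - 1 →
          ¬ (PySem.Int.band ((b % 256) >>> s) 1 ≠ 0)))) := by
  have h1 : 0 ≤ b % 256 := Int.emod_nonneg b (by norm_num)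
  have h2 : b % 256 < 256 := Int.emod_lt_of_pos b (by norm_num)
  have h := byteFact (b % 256).toNat (by omega)
  rwa [Int.toNat_of_nonneg h1] at h

-- one byte of A's descending bit scan collapses to B's per-byte step
lemma aScan_step (t : List Int) (bp : Int) (k : Nat) :
    aScan t bp (8 * k + 8) =
      (if (t.getD k 0) % 256 = 0 then aScan t bp (8 * k)
       else ((8 * k : Int) + 8
              - (PySem.Int.bitLength (PySem.Int.band ((t.getD k 0) % 256) (-((t.getD k 0) % 256))) : Int))
            + bp * 8) := by
  obtain ⟨hz, hnz⟩ := byteFact_of (t.getD k 0)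
  simp only [aScan]
  rw [show (8*k+7)/8 = k by omega, show 7-(8*k+7)%8 = 0 by omega,
      show (8*k+6)/8 = k by omega, show 7-(8*k+6)%8 = 1 by omega,
      show (8*k+5)/8 = k by omega, show 7-(8*k+5)%8 = 2 by omega,
      show (8*k+4)/8 = k by omega, show 7-(8*k+4)%8 = 3 by omega,
      show (8*k+3)/8 = k by omega, show 7-(8*k+3)%8 = 4 by omega,
      show (8*k+2)/8 = k by omega, show 7-(8*k+2)%8 = 5 by omega,
      show (8*k+1)/8 = k by omega, show 7-(8*k+1)%8 = 6 by omega,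
      show (8*k)/8 = k by omega, show 7-(8*k)%8 = 7 by omega]
  simp only [bit_stable (t.getD k 0) 0 (by norm_num), bit_stable (t.getD k 0) 1 (by norm_num),
    bit_stable (t.getD k 0) 2 (by norm_num), bit_stable (t.getD k 0) 3 (by norm_num),
    bit_stable (t.getD k 0) 4 (by norm_num), bit_stable (t.getD k 0) 5 (by norm_num),
    bit_stable (t.getD k 0) 6 (by norm_num), bit_stable (t.getD k 0) 7 (by norm_num)]
  by_cases hv : (t.getD k 0) % 256 = 0
  · have h0 := hz.mp hv 0 (by norm_num)
    have h1 := hz.mp hv 1 (by norm_num)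
    have h2 := hz.mp hv 2 (by norm_num)
    have h3 := hz.mp hv 3 (by norm_num)
    have h4 := hz.mp hv 4 (by norm_num)
    have h5 := hz.mp hv 5 (by norm_num)
    have h6 := hz.mp hv 6 (by norm_num)
    have h7 := hz.mp hv 7 (by norm_num)
    rw [if_neg h0, if_neg h1, if_neg h2, if_neg h3, if_neg h4, if_neg h5, if_neg h6, if_neg h7,
        if_pos hv]
  · obtain ⟨hL1, hL8, hset, hlow⟩ := hnz hv
    rw [if_neg hv]
    set L := PySem.Int.bitLength (PySem.Int.band ((t.getD k 0) % 256) (-((t.getD k 0) % 256))) with hLdef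
    have hcase : L = 1 ∨ L = 2 ∨ L = 3 ∨ L = 4 ∨ L = 5 ∨ L = 6 ∨ L = 7 ∨ L = 8 := by omega
    rcases hcase with h | h | h | h | h | h | h | h
    · rw [h] at hset hlow ⊢
      simp only [show (1-1 : Nat) = 0 from rfl] at hset hlow
      rw [if_pos hset]
      push_cast
      omega
    · rw [h] at hset hlow ⊢
      simp only [show (2-1 : Nat) = 1 from rfl] at hset hlow
      rw [if_neg (hlow 0 (by norm_num)), if_pos hset]
      push_cast
      omega
    · rw [h] at hset hlow ⊢
      simp only [show (3-1 : Nat) = 2 from rfl] at hset hlow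
      rw [if_neg (hlow 0 (by norm_num)), if_neg (hlow 1 (by norm_num)), if_pos hset]
      push_cast
      omega
    · rw [h] at hset hlow ⊢
      simp only [show (4-1 : Nat) = 3 from rfl] at hset hlow
      rw [if_neg (hlow 0 (by norm_num)), if_neg (hlow 1 (by norm_num)), if_neg (hlow 2 (by norm_num)), if_pos hset]
      push_cast
      omega
    · rw [h] at hset hlow ⊢
      simp only [show (5-1 : Nat) = 4 from rfl] at hset hlow
      rw [if_neg (hlow 0 (by norm_num)), if_neg (hlow 1 (by norm_num)), if_neg (hlow 2 (by norm_num)), if_neg (hlow 3 (by norm_num)), if_pos hset]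
      push_cast
      omega
    · rw [h] at hset hlow ⊢
      simp only [show (6-1 : Nat) = 5 from rfl] at hset hlow
      rw [if_neg (hlow 0 (by norm_num)), if_neg (hlow 1 (by norm_num)), if_neg (hlow 2 (by norm_num)), if_neg (hlow 3 (by norm_num)), if_neg (hlow 4 (by norm_num)), if_pos hset]
      push_cast
      omega
    · rw [h] at hset hlow ⊢
      simp only [show (7-1 : Nat) = 6 from rfl] at hset hlow
      rw [if_neg (hlow 0 (by norm_num)), if_neg (hlow 1 (by norm_num)), if_neg (hlow 2 (by norm_num)), if_neg (hlow 3 (by norm_num)), if_neg (hlow 4 (by norm_num)), if_neg (hlow 5 (by norm_num)), if_pos hset]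
      push_cast
      omega
    · rw [h] at hset hlow ⊢
      simp only [show (8-1 : Nat) = 7 from rfl] at hset hlow
      rw [if_neg (hlow 0 (by norm_num)), if_neg (hlow 1 (by norm_num)), if_neg (hlow 2 (by norm_num)), if_neg (hlow 3 (by norm_num)), if_neg (hlow 4 (by norm_num)), if_neg (hlow 5 (by norm_num)), if_neg (hlow 6 (by norm_num)), if_pos hset]
      push_cast
      omega

-- A's scan-plus-sentinel test over the dropped prefix equals B's in-place byte loop
lemma scan_eq (data : List Int) (bp bitp : Int) (start : Nat) (hsb : (start : Int) = bp) :
    ∀ m, (if aScan (data.drop start) bp (8 * m) = -1 then false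
          else decide (aScan (data.drop start) bp (8 * m) > bitp)) = bScan data bitp start m := by
  intro m
  induction m with
  | zero => simp [aScan, bScan]
  | succ m ih =>
    rw [show 8 * (m + 1) = 8 * m + 8 by ring, aScan_step]
    have hgd : (data.drop start).getD m 0 = data.getD (start + m) 0 := by
      simp [List.getD, List.getElem?_drop]
    rw [hgd]
    show _ = bScan data bitp start (m + 1)
    simp only [bScan, band255]
    by_cases hv : data.getD (start + m) 0 % 256 = 0
    · rw [if_pos hv, if_neg (not_not_intro hv)]
      exact ih
    · obtain ⟨hL1, hL8, -, -⟩ := (byteFact_of (data.getD (start + m) 0)).2 hv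
      set L := PySem.Int.bitLength
        (PySem.Int.band ((data.getD (start + m) 0) % 256) (-((data.getD (start + m) 0) % 256)))
        with hLdef
      have hne : ((8 * m : Int) + 8 - (L : Int)) + bp * 8 ≠ -1 := by
        have hL : (L : Int) ≤ 8 := by exact_mod_cast hL8
        have hb8 : 0 ≤ bp := by omega
        nlinarith
      rw [if_neg hv, if_pos hv, if_neg hne]
      rw [show ((8 * m : Int) + 8 - (L : Int)) + bp * 8
            = 8 * ((start + m : Nat) : Int) + 7 - ((L : Int) - 1) by push_cast [← hsb]; ring]

-- ===== VERDICT (by name: the statement is the Claim_ definition above) =====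
theorem more_rbsp_data_spec : Claim_equal_more_rbsp_data := by
  intro data bit_pos _ hpre
  unfold Spec_more_rbsp_data more_rbsp_data more_rbsp_data_alt
  have hbp : 0 ≤ PySem.Int.floordiv bit_pos 8 := by
    rw [PySem.Int.floordiv_eq_ediv_of_pos (by norm_num)]
    exact Int.ediv_nonneg hpre (by norm_num)
  by_cases hg : (data.length : Int) ≤ PySem.Int.floordiv bit_pos 8
  · simp only [if_pos hg]
  · simp only [if_neg hg]
    rw [PySem.List.slice_from data hbp]
    rw [show (data.drop (PySem.Int.floordiv bit_pos 8).toNat).length * 8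
         = 8 * (data.drop (PySem.Int.floordiv bit_pos 8).toNat).length by ring,
        List.length_drop]
    exact scan_eq data _ bit_pos _ (Int.toNat_of_nonneg hbp) _
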